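-- pv_equiv track=rewrite | github.com/loki0b/intro-programming | 06-tuples_dict/221L6Q2.py | encontrar_posicao
-- ===== SOURCE A (Python) =====
-- def encontrar_posicao(dicionario, soma):
--     lista_posicao = []
--
--     for chave1, valor1 in dicionario.items():
--         for chave2, valor2 in dicionario.items():
--             if chave1 == chave2:
--                 continue
--             else:
--                 if valor1 + valor2 == soma:
--                     lista_posicao.append(chave1)
--                     lista_posicao.append(chave2)
--
--                     return lista_posicao
-- ===== SOURCE B (Python) =====
-- def encontrar_posicao(dicionario, soma):
--     por_valor = {}
--     for chave, valor in dicionario.items():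
--         por_valor.setdefault(valor, []).append(chave)
--     for chave1, valor1 in dicionario.items():
--         chaves = por_valor.get(soma - valor1)
--         if chaves:
--             if chaves[0] != chave1:
--                 return [chave1, chaves[0]]
--             if len(chaves) > 1:
--                 return [chave1, chaves[1]]
-- ===== Notes on version B (the rewrite author's own statement) =====
-- stated objective: faster
-- what changed: Replaces the quadratic nested scan with a one-pass value->keys hash index: each outer item looks up the complement soma-valor1 and takes the earliest key distinct from its own.
import Mathlib
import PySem

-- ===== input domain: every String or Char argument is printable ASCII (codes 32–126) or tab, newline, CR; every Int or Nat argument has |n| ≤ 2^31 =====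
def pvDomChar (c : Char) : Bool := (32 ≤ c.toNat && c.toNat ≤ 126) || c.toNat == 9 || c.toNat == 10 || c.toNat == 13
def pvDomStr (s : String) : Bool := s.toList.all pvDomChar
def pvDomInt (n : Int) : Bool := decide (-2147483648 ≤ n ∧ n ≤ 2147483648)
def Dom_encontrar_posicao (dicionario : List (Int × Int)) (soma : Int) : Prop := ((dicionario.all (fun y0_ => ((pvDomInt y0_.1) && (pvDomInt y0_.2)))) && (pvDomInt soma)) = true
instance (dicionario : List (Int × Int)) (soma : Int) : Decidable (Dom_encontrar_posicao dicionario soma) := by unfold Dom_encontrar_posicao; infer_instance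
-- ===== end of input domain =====

-- B replaces A's quadratic nested scan with a one-pass value->keys index (hash map),
-- looking up the complement soma-valor1 per item: asymptotically faster, same results.


-- ===== PORT A =====
-- inner `for chave2, valor2 in dicionario.items()` loop of A
def epInner (chave1 valor1 soma : Int) : List (Int × Int) → Option (List Int)
  | [] => none
  | (chave2, valor2) :: rest =>
    if chave1 = chave2 then epInner chave1 valor1 soma rest
    else if valor1 + valor2 = soma then some [chave1, chave2]
    else epInner chave1 valor1 soma rest

-- outer `for chave1, valor1 in dicionario.items()` loop of A
def epOuter (dicionario : List (Int × Int)) (soma : Int) : List (Int × Int) → Option (List Int)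
  | [] => none
  | (chave1, valor1) :: rest =>
    match epInner chave1 valor1 soma dicionario with
    | some r => some r
    | none => epOuter dicionario soma rest

def encontrar_posicao (dicionario : List (Int × Int)) (soma : Int) : Option (List Int) :=
  epOuter dicionario soma dicionario

-- ===== PORT B =====
-- `por_valor.setdefault(valor, []).append(chave)` loop of B
def epIndex (dicionario : List (Int × Int)) : PySem.Dict Int (List Int) :=
  dicionario.foldl (fun d p => d.modify p.2 [] (· ++ [p.1])) PySem.Dict.empty

-- second loop of B: look up the complement in the index
def epLoop (idx : PySem.Dict Int (List Int)) (soma : Int) : List (Int × Int) → Option (List Int)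
  | [] => none
  | (chave1, valor1) :: rest =>
    match idx.getD (soma - valor1) [] with
    | [] => epLoop idx soma rest
    | c0 :: tail =>
      if c0 ≠ chave1 then some [chave1, c0]
      else
        match tail with
        | c1 :: _ => some [chave1, c1]
        | [] => epLoop idx soma rest

def encontrar_posicao_alt (dicionario : List (Int × Int)) (soma : Int) : Option (List Int) :=
  epLoop (epIndex dicionario) soma dicionario

-- ===== PRECONDITION & SPEC =====
-- The argument encodes a Python dict, whose keys are necessarily unique; association
-- lists with duplicate keys correspond to no Python input, so Pre_ requires distinct keys.
def Pre_encontrar_posicao (dicionario : List (Int × Int)) (soma : Int) : Prop :=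
  (dicionario.map Prod.fst).Nodup

instance (dicionario : List (Int × Int)) (soma : Int) : Decidable (Pre_encontrar_posicao dicionario soma) := by
  unfold Pre_encontrar_posicao; infer_instance

def pvWitness_encontrar_posicao : (List (Int × Int)) × Int := ([(1, 2), (2, 3)], 5)

def Spec_encontrar_posicao (dicionario : List (Int × Int)) (soma : Int) (out : Option (List Int)) : Prop := out = encontrar_posicao_alt dicionario soma
instance (dicionario : List (Int × Int)) (soma : Int) (out : Option (List Int)) : Decidable (Spec_encontrar_posicao dicionario soma out) := by unfold Spec_encontrar_posicao; infer_instance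

-- ===== CLAIM (what is proved, stated in full; the proofs are below) =====
def Claim_equal_encontrar_posicao : Prop := ∀ (dicionario : List (Int × Int)) (soma : Int), Dom_encontrar_posicao dicionario soma → Pre_encontrar_posicao dicionario soma → Spec_encontrar_posicao dicionario soma (encontrar_posicao dicionario soma)

-- ===== LEMMAS AND PROOFS =====

-- the index maps a value v to the keys carrying v, in insertion order
theorem epIndex_getD (l : List (Int × Int)) (d : PySem.Dict Int (List Int)) (v : Int) :
    (l.foldl (fun d p => d.modify p.2 [] (· ++ [p.1])) d).getD v [] =
      d.getD v [] ++ (l.filter (fun p => p.2 == v)).map Prod.fst := by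
  induction l generalizing d with
  | nil => simp
  | cons p rest ih =>
    simp only [List.foldl_cons, ih, PySem.Dict.getD_modify, List.filter_cons]
    by_cases h : p.2 = v
    · simp [h]
    · have h' : ¬ v = p.2 := fun hv => h hv.symm
      simp [h, h']

-- A's inner loop returns the first key ≠ chave1 among the keys whose value is soma - valor1
theorem epInner_eq_find (chave1 valor1 soma : Int) (l : List (Int × Int)) :
    epInner chave1 valor1 soma l =
      (((l.filter (fun p => p.2 == soma - valor1)).map Prod.fst).find?
        (fun c => decide (c ≠ chave1))).map (fun c => [chave1, c]) := by
  induction l with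
  | nil => simp [epInner]
  | cons p rest ih =>
    obtain ⟨k2, v2⟩ := p
    by_cases hk : chave1 = k2
    · subst hk
      by_cases hv : v2 = soma - valor1 <;>
        simp [epInner, hv, List.filter_cons, List.find?_cons, ih]
    · by_cases hv : valor1 + v2 = soma
      · have hv' : v2 = soma - valor1 := by omega
        simp [epInner, hk, hv, hv', List.filter_cons, List.find?_cons, Ne.symm hk]
      · have hv' : ¬ (v2 = soma - valor1) := by omega
        simp [epInner, hk, hv, hv', List.filter_cons, ih]

-- B's head-step on a duplicate-free key list is find? of the first key ≠ chave1
theorem epLoop_cons (idx : PySem.Dict Int (List Int)) (soma chave1 valor1 : Int)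
    (rest : List (Int × Int)) (hnd : (idx.getD (soma - valor1) []).Nodup) :
    epLoop idx soma ((chave1, valor1) :: rest) =
      match (idx.getD (soma - valor1) []).find? (fun c => decide (c ≠ chave1)) with
      | some c => some [chave1, c]
      | none => epLoop idx soma rest := by
  cases hch : idx.getD (soma - valor1) [] with
  | nil => simp [epLoop, hch]
  | cons c0 tail =>
    rw [hch] at hnd
    by_cases h0 : c0 = chave1
    · have hnot : chave1 ∉ tail := by
        rw [List.nodup_cons] at hnd; exact h0 ▸ hnd.1
      cases tail with
      | nil => simp [epLoop, hch, h0]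
      | cons c1 t =>
        have h1 : ¬ c1 = chave1 := fun h => hnot (h ▸ List.mem_cons_self ..)
        simp [epLoop, hch, h0, h1]
    · simp [epLoop, hch, h0]

theorem epIndex_getD_nodup (dicionario : List (Int × Int)) (v : Int)
    (h : (dicionario.map Prod.fst).Nodup) :
    ((epIndex dicionario).getD v []).Nodup := by
  have heq : (epIndex dicionario).getD v [] =
      (dicionario.filter (fun p => p.2 == v)).map Prod.fst := by
    simpa using epIndex_getD dicionario PySem.Dict.empty v
  rw [heq]
  exact h.sublist (List.Sublist.map Prod.fst List.filter_sublist)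

theorem epOuter_eq_epLoop (dicionario : List (Int × Int)) (soma : Int)
    (h : (dicionario.map Prod.fst).Nodup) :
    ∀ l, epOuter dicionario soma l = epLoop (epIndex dicionario) soma l := by
  intro l
  induction l with
  | nil => rfl
  | cons p rest ih =>
    obtain ⟨chave1, valor1⟩ := p
    rw [epLoop_cons _ _ _ _ _ (epIndex_getD_nodup dicionario _ h)]
    have hidx : (epIndex dicionario).getD (soma - valor1) [] =
        (dicionario.filter (fun p => p.2 == soma - valor1)).map Prod.fst := by
      simpa using epIndex_getD dicionario PySem.Dict.empty (soma - valor1)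
    show (match epInner chave1 valor1 soma dicionario with
          | some r => some r
          | none => epOuter dicionario soma rest) = _
    rw [epInner_eq_find, hidx, ih]
    cases ((dicionario.filter (fun p => p.2 == soma - valor1)).map Prod.fst).find?
        (fun c => decide (c ≠ chave1)) <;> rfl

-- ===== VERDICT (by name: the statement is the Claim_ definition above) =====
theorem encontrar_posicao_spec : Claim_equal_encontrar_posicao := by
  intro dicionario soma _ hpre
  unfold Spec_encontrar_posicao encontrar_posicao encontrar_posicao_alt
  exact epOuter_eq_epLoop dicionario soma hpre dicionario
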